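-- pv_equiv track=rewrite | github.com/posl/comment_recommendation | script/split_gen/5_time/zh/249_B/3.py | isWonderful
-- ===== SOURCE A (Python) =====
-- def isWonderful(s):
--     if s.islower() or s.isupper() or len(s) % 2 == 1:
--         return False
--     else:
--         for i in range(0, len(s), 2):
--             if s[i] != s[i + 1]:
--                 return False
--         return True
-- ===== SOURCE B (Python) =====
-- def isWonderful(s):
--     if s.islower() or s.isupper() or len(s) % 2 == 1:
--         return False
--     return s[::2] == s[1::2]
-- ===== Notes on version B (the rewrite author's own statement) =====
-- stated objective: simpler
-- what changed: Replaces the index loop over range(0, len, 2) comparing s[i] with s[i+1] by one wholesale comparison of the two stride-2 slices s[::2] == s[1::2] (same guard).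
import Mathlib
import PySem

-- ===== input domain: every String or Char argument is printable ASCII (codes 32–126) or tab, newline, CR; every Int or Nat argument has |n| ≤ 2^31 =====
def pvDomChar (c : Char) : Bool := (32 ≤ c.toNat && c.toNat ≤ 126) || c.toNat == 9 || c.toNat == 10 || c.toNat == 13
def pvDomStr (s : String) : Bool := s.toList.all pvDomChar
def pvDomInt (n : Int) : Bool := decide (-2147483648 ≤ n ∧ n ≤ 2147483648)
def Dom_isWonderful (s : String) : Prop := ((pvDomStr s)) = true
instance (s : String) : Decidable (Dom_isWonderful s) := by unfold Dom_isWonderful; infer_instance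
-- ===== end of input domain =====

-- B keeps A's guard but replaces the index loop comparing s[i] with s[i+1] by one comparison of the stride-2 slices s[::2] == s[1::2] (simpler, same cost).

-- ===== PORT A =====
-- s.islower() on the ASCII domain: at least one cased character and no uppercase one
def strIslower (cs : List Char) : Bool :=
  cs.any PySem.Chars.islower && cs.all (fun c => !PySem.Chars.isupper c)
-- s.isupper() on the ASCII domain: at least one cased character and no lowercase one
def strIsupper (cs : List Char) : Bool :=
  cs.any PySem.Chars.isupper && cs.all (fun c => !PySem.Chars.islower c)

-- the for-loop over range(0, len(s), 2); the `none` branches (IndexError) are unreachable under the even-length guard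
def loopA (cs : List Char) : List Int → Bool
  | [] => true
  | i :: rest =>
    match PySem.List.pyGet? cs i, PySem.List.pyGet? cs (i + 1) with
    | some a, some b => if a != b then false else loopA cs rest
    | _, _ => false

def isWonderful (s : String) : Bool :=
  if strIslower s.toList || strIsupper s.toList || s.toList.length % 2 == 1 then false
  else loopA s.toList (PySem.List.pyRange 0 s.toList.length 2)

-- ===== PORT B =====
def isWonderful_alt (s : String) : Bool :=
  if strIslower s.toList || strIsupper s.toList || s.toList.length % 2 == 1 then false
  else PySem.Chars.slice? s.toList none none 2 == PySem.Chars.slice? s.toList (some 1) none 2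

-- ===== PRECONDITION & SPEC =====
def Spec_isWonderful (s : String) (out : Bool) : Prop := out = isWonderful_alt s
instance (s : String) (out : Bool) : Decidable (Spec_isWonderful s out) := by unfold Spec_isWonderful; infer_instance

-- ===== CLAIM (what is proved, stated in full; the proofs are below) =====
def Claim_equal_isWonderful : Prop := ∀ (s : String), Dom_isWonderful s → Spec_isWonderful s (isWonderful s)

-- ===== LEMMAS AND PROOFS =====

-- even-indexed elements of a list
def evens : List Char → List Char
  | [] => []
  | [a] => [a]
  | a :: _ :: t => a :: evens t

-- adjacent pairs all equal
def pairEq : List Char → Bool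
  | [] => true
  | [_] => true
  | a :: b :: t => (a == b) && pairEq t

theorem evens_cons_tail (b : Char) (t : List Char) : evens (b :: t) = b :: evens t.tail := by
  cases t <;> simp [evens]

theorem filterMap_evens (cs : List Char) :
    List.filterMap (fun k => cs[2 * k]?) (List.range ((cs.length + 1) / 2)) = evens cs := by
  induction cs using evens.induct with
  | case1 => simp [evens]
  | case2 a => simp [evens, List.range_succ]
  | case3 a b t ih =>
    have hlen : ((a :: b :: t).length + 1) / 2 = (t.length + 1) / 2 + 1 := by simp; omega
    rw [hlen, List.range_succ_eq_map, List.filterMap_cons, List.filterMap_map]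
    have hfn : ((fun k => (a :: b :: t)[2 * k]?) ∘ Nat.succ) = fun k => t[2 * k]? := by
      funext k
      have h2 : 2 * k.succ = (2 * k) + 1 + 1 := by omega
      simp only [Function.comp, h2, List.getElem?_cons_succ]
    rw [hfn, ih]
    simp [evens]

theorem filterMap_odds (cs : List Char) :
    List.filterMap (fun k => cs[2 * k + 1]?) (List.range (cs.length / 2)) = evens cs.tail := by
  induction cs using evens.induct with
  | case1 => simp [evens]
  | case2 a => simp [evens]
  | case3 a b t ih =>
    have hlen : (a :: b :: t).length / 2 = t.length / 2 + 1 := by simp; omega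
    rw [hlen, List.range_succ_eq_map, List.filterMap_cons, List.filterMap_map]
    have hfn : ((fun k => (a :: b :: t)[2 * k + 1]?) ∘ Nat.succ) = fun k => t[2 * k + 1]? := by
      funext k
      have h2 : 2 * k.succ + 1 = (2 * k + 1) + 1 + 1 := by omega
      simp only [Function.comp, h2, List.getElem?_cons_succ]
    rw [hfn, ih]
    simp only [List.tail_cons]
    rw [evens_cons_tail]
    rfl

theorem evens_eq_iff_pairEq (cs : List Char) (h : cs.length % 2 = 0) :
    (evens cs == evens cs.tail) = pairEq cs := by
  induction cs using pairEq.induct with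
  | case1 => simp [evens, pairEq]
  | case2 a => simp at h
  | case3 a b t ih =>
    have ht : t.length % 2 = 0 := by simp at h; omega
    simp only [evens, List.tail_cons, pairEq]
    rw [evens_cons_tail, List.cons_beq_cons, ih ht]

theorem loopA_shift (a b : Char) (t : List Char) (ns : List Nat) :
    loopA (a :: b :: t) (ns.map (fun (n : Nat) => ((n : Int) + 2))) =
      loopA t (ns.map (fun (n : Nat) => (n : Int))) := by
  induction ns with
  | nil => rfl
  | cons n ns ih =>
    show (match PySem.List.pyGet? (a :: b :: t) ((n:Int) + 2),
            PySem.List.pyGet? (a :: b :: t) ((n:Int) + 2 + 1) with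
          | some x, some y => if x != y then false else
              loopA (a :: b :: t) (ns.map (fun (n : Nat) => ((n : Int) + 2)))
          | _, _ => false) =
        (match PySem.List.pyGet? t (n:Int), PySem.List.pyGet? t ((n:Int) + 1) with
          | some x, some y => if x != y then false else loopA t (ns.map (fun (n : Nat) => (n : Int)))
          | _, _ => false)
    have e1 : PySem.List.pyGet? (a :: b :: t) ((n:Int) + 2) = PySem.List.pyGet? t (n:Int) := by
      have h1 : ((n:Int) + 2) = ((n + 2 : Nat) : Int) := by push_cast; ring
      rw [h1, PySem.List.pyGet?_natCast, PySem.List.pyGet?_natCast]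
      simp
    have e2 : PySem.List.pyGet? (a :: b :: t) ((n:Int) + 2 + 1) = PySem.List.pyGet? t ((n:Int) + 1) := by
      have h1 : ((n:Int) + 2 + 1) = ((n + 3 : Nat) : Int) := by push_cast; ring
      have h2 : ((n:Int) + 1) = ((n + 1 : Nat) : Int) := by push_cast; ring
      rw [h1, h2, PySem.List.pyGet?_natCast, PySem.List.pyGet?_natCast]
      simp
    rw [e1, e2]
    cases hx : PySem.List.pyGet? t (n:Int) <;> cases hy : PySem.List.pyGet? t ((n:Int) + 1) <;>
      simp [ih]

theorem loopA_char (cs : List Char) (h : cs.length % 2 = 0) :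
    loopA cs ((List.range ((cs.length + 1) / 2)).map (fun (k : Nat) => (2 * (k : Int)))) = pairEq cs := by
  induction cs using pairEq.induct with
  | case1 => rfl
  | case2 a => simp at h
  | case3 a b t ih =>
    have ht : t.length % 2 = 0 := by simp at h; omega
    have hlen : ((a :: b :: t).length + 1) / 2 = (t.length + 1) / 2 + 1 := by simp; omega
    rw [hlen, List.range_succ_eq_map, List.map_cons, List.map_map]
    show (match PySem.List.pyGet? (a :: b :: t) (2 * ((0:Nat):Int)),
            PySem.List.pyGet? (a :: b :: t) (2 * ((0:Nat):Int) + 1) with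
          | some x, some y => if x != y then false else
              loopA (a :: b :: t)
                ((List.range ((t.length + 1) / 2)).map ((fun (k : Nat) => (2 * (k : Int))) ∘ Nat.succ))
          | _, _ => false) = pairEq (a :: b :: t)
    have e0 : PySem.List.pyGet? (a :: b :: t) (2 * ((0:Nat):Int)) = some a := by
      have h0 : (2 * ((0:Nat):Int)) = (((0:Nat)):Int) := by norm_num
      rw [h0, PySem.List.pyGet?_natCast]; rfl
    have e1 : PySem.List.pyGet? (a :: b :: t) (2 * ((0:Nat):Int) + 1) = some b := by
      have h0 : (2 * ((0:Nat):Int) + 1) = (((1:Nat)):Int) := by norm_num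
      rw [h0, PySem.List.pyGet?_natCast]; rfl
    rw [e0, e1]
    have hmap : (List.range ((t.length + 1) / 2)).map ((fun (k : Nat) => (2 * (k : Int))) ∘ Nat.succ) =
        ((List.range ((t.length + 1) / 2)).map (fun (k : Nat) => 2 * k)).map (fun (n : Nat) => ((n : Int) + 2)) := by
      rw [List.map_map]
      congr 1
    have hmap2 : ((List.range ((t.length + 1) / 2)).map (fun (k : Nat) => 2 * k)).map (fun (n : Nat) => (n : Int)) =
        (List.range ((t.length + 1) / 2)).map (fun (k : Nat) => (2 * (k : Int))) := by
      rw [List.map_map]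
      congr 1
    rw [hmap, loopA_shift, hmap2, ih ht]
    show (if a != b then false else pairEq t) = pairEq (a :: b :: t)
    cases hab : a == b <;> simp [pairEq, bne, hab]

theorem pyRange_two (n : Nat) :
    PySem.List.pyRange 0 n 2 = (List.range ((n + 1) / 2)).map (fun (k : Nat) => (2 * (k : Int))) := by
  simp only [PySem.List.pyRange]
  norm_num
  have h : (if 0 < n then (((n:Int) + 2 - 1) / 2).toNat else 0) = (n + 1) / 2 := by
    split <;> omega
  rw [h]

theorem slice?_evens (cs : List Char) :
    PySem.List.slice? cs none none 2 = some (evens cs) := by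
  rw [← filterMap_evens]
  simp only [PySem.List.slice?, PySem.List.sliceIndices]
  norm_num
  have h : (if 0 < cs.length then (((cs.length:Int) + 2 - 1) / 2).toNat else 0) = (cs.length + 1) / 2 := by
    split <;> omega
  rw [h]
  have h2 : ∀ x : Nat, ((2 * (x:Int)).toNat) = 2 * x := fun x => by omega
  simp [h2]

theorem slice?_odds (cs : List Char) :
    PySem.List.slice? cs (some 1) none 2 = some (evens cs.tail) := by
  rw [← filterMap_odds]
  simp only [PySem.List.slice?, PySem.List.sliceIndices]
  norm_num
  by_cases h0 : cs.length = 0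
  · simp [h0]
  · have hm : min 1 (cs.length:Int) = 1 := by omega
    simp only [hm]
    have hc : (if 1 < cs.length then (((cs.length:Int) - 1 + 2 - 1) / 2).toNat else 0) = cs.length / 2 := by
      split <;> omega
    rw [hc]
    have h2 : ∀ x : Nat, ((1 + 2 * (x:Int)).toNat) = 2 * x + 1 := fun x => by omega
    simp [h2]

-- ===== VERDICT (by name: the statement is the Claim_ definition above) =====
theorem isWonderful_spec : Claim_equal_isWonderful := by
  intro s _
  unfold Spec_isWonderful isWonderful isWonderful_alt
  by_cases hg : (strIslower s.toList || strIsupper s.toList || s.toList.length % 2 == 1) = true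
  · rw [if_pos hg, if_pos hg]
  · rw [if_neg hg, if_neg hg]
    have hev : s.toList.length % 2 = 0 := by
      simp only [Bool.or_eq_true, beq_iff_eq] at hg
      omega
    rw [pyRange_two, loopA_char _ hev,
        PySem.Chars.slice?_eq_listSlice?, PySem.Chars.slice?_eq_listSlice?,
        slice?_evens, slice?_odds, ← evens_eq_iff_pairEq _ hev]
    simp
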